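-- pv_equiv track=rewrite | github.com/wyk18703232953/myResearch | codeComplex/data copy/filteredData/python/quadratic/python_quadratic_0550.py | core_algorithm
-- ===== SOURCE A (Python) =====
-- def core_algorithm(n, k):
--     ans = []
--     total = n * k
--     for i in range(1, total + 1):
--         if i % 2:
--             x, y = divmod(i // 2, k)
--             ans.append([x + 1, y + 1])
--
--         else:
--             x, y = divmod(total - i // 2, k)
--             ans.append([x + 1, y + 1])
--     return ans
-- ===== SOURCE B (Python) =====
-- def core_algorithm(n, k):
--     total = n * k
--     lows = list(range((total + 1) // 2))
--     highs = list(range(total - 1, total - 1 - total // 2, -1))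
--     vals = []
--     for lo, hi in zip(lows, highs):
--         vals.append(lo)
--         vals.append(hi)
--     if len(lows) > len(highs):
--         vals.append(lows[-1])
--     return [[v // k + 1, v % k + 1] for v in vals]
-- ===== Notes on version B (the rewrite author's own statement) =====
-- stated objective: alternative
-- what changed: Replaces the single 1..n*k loop with a per-iteration parity branch by explicitly building the increasing and decreasing halves as two ranges, interleaving them with zip (plus the odd-length tail), and mapping divmod over the merged value list.
import Mathlib
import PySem

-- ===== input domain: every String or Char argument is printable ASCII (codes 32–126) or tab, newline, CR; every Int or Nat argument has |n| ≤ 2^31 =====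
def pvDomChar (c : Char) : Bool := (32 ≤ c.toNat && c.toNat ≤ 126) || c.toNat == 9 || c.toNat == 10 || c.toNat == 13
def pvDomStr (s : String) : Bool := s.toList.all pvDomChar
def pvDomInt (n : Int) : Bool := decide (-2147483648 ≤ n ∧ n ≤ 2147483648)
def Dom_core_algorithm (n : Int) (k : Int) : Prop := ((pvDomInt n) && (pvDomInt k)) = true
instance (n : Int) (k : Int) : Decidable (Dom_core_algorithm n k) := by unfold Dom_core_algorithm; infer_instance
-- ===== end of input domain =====

-- B builds the increasing and decreasing value halves as two explicit ranges and
-- zip-interleaves them (plus the odd-length tail), instead of A's single loop with a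
-- per-iteration parity branch; objective: alternative decomposition, same cost.

-- ===== PORT A =====
-- divmod(v, k) is ported as (floordiv v k, mod v k); exact here since the loop body only
-- runs when total = n*k ≥ 1, which forces k ≠ 0 (Python divmod raises only at k = 0).
def core_algorithm (n : Int) (k : Int) : List (List Int) :=
  let total := n * k
  (PySem.List.pyRange 1 (total + 1) 1).foldl
    (fun ans i =>
      if PySem.Int.mod i 2 ≠ 0 then
        let x := PySem.Int.floordiv (PySem.Int.floordiv i 2) k
        let y := PySem.Int.mod (PySem.Int.floordiv i 2) k
        ans ++ [[x + 1, y + 1]]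
      else
        let x := PySem.Int.floordiv (total - PySem.Int.floordiv i 2) k
        let y := PySem.Int.mod (total - PySem.Int.floordiv i 2) k
        ans ++ [[x + 1, y + 1]]) []

-- ===== PORT B =====
-- lows[-1] is ported as getLast!; exact since the guard len(highs) < len(lows) forces lows ≠ [].
def core_algorithm_alt (n : Int) (k : Int) : List (List Int) :=
  let total := n * k
  let lows := PySem.List.pyRange 0 (PySem.Int.floordiv (total + 1) 2) 1
  let highs := PySem.List.pyRange (total - 1) (total - 1 - PySem.Int.floordiv total 2) (-1)
  let vals := (lows.zip highs).foldl (fun acc p => acc ++ [p.1, p.2]) []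
  let vals := if highs.length < lows.length then vals ++ [lows.getLast!] else vals
  vals.map (fun v => [PySem.Int.floordiv v k + 1, PySem.Int.mod v k + 1])

-- ===== PRECONDITION & SPEC =====
def Spec_core_algorithm (n : Int) (k : Int) (out : List (List Int)) : Prop := out = core_algorithm_alt n k
instance (n : Int) (k : Int) (out : List (List Int)) : Decidable (Spec_core_algorithm n k out) := by unfold Spec_core_algorithm; infer_instance

-- ===== CLAIM (what is proved, stated in full; the proofs are below) =====
def Claim_equal_core_algorithm : Prop := ∀ (n : Int) (k : Int), Dom_core_algorithm n k → Spec_core_algorithm n k (core_algorithm n k)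

-- ===== LEMMAS AND PROOFS =====

def pvF (k v : Int) : List Int := [PySem.Int.floordiv v k + 1, PySem.Int.mod v k + 1]

def pvVal (t : Int) (j : Nat) : Int :=
  if j % 2 = 0 then ((j / 2 : Nat) : Int) else t - 1 - ((j / 2 : Nat) : Int)

theorem pv_A_eq (n k : Int) :
    core_algorithm n k = (List.range (n*k).toNat).map (fun j => pvF k (pvVal (n*k) j)) := by
  unfold core_algorithm
  dsimp only
  have hb : (fun (ans : List (List Int)) (i : Int) =>
      if PySem.Int.mod i 2 ≠ 0 then
        ans ++ [[PySem.Int.floordiv (PySem.Int.floordiv i 2) k + 1,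
                 PySem.Int.mod (PySem.Int.floordiv i 2) k + 1]]
      else
        ans ++ [[PySem.Int.floordiv (n*k - PySem.Int.floordiv i 2) k + 1,
                 PySem.Int.mod (n*k - PySem.Int.floordiv i 2) k + 1]])
      = fun ans i => ans ++ [if PySem.Int.mod i 2 ≠ 0 then pvF k (PySem.Int.floordiv i 2)
                             else pvF k (n*k - PySem.Int.floordiv i 2)] := by
    funext ans i
    unfold pvF
    split <;> rfl
  rw [hb, PySem.List.foldl_append_singleton_eq_map, List.nil_append, PySem.List.pyRange_one,
      List.map_map]
  have hm : (n*k + 1 - 1).toNat = (n*k).toNat := by omega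
  rw [hm]
  apply List.map_congr_left
  intro j hj
  simp only [Function.comp_apply, List.mem_range] at *
  simp only [PySem.Int.mod_eq_emod_of_pos (show (0:Int) < 2 by norm_num),
             PySem.Int.floordiv_eq_ediv_of_pos (show (0:Int) < 2 by norm_num)]
  unfold pvVal
  by_cases hp : j % 2 = 0
  · have h1 : (1 + (j:Int)) % 2 ≠ 0 := by omega
    rw [if_pos h1, if_pos hp]
    exact congrArg (pvF k) (by omega)
  · have h1 : ¬ ((1 + (j:Int)) % 2 ≠ 0) := by omega
    rw [if_neg h1, if_neg hp]
    exact congrArg (pvF k) (by omega)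

theorem pv_getLast!_eq (l : List Int) (h : l ≠ []) : l.getLast! = l.getLast h := by
  cases l with
  | nil => exact absurd rfl h
  | cons a as => rfl

theorem pv_flatPairs_length (zs : List (Int × Int)) :
    (zs.flatMap (fun p => [p.1, p.2])).length = 2 * zs.length := by
  induction zs with
  | nil => simp
  | cons z zs ih => simp only [List.flatMap_cons, List.length_append, ih, List.length_cons]; simp; omega

theorem pv_flatPairs_get? (zs : List (Int × Int)) (j : Nat) :
    (zs.flatMap (fun p => [p.1, p.2]))[j]? =
      if j % 2 = 0 then zs[j / 2]?.map Prod.fst else zs[j / 2]?.map Prod.snd := by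
  induction zs generalizing j with
  | nil => simp
  | cons z zs ih =>
    match j with
    | 0 => simp
    | 1 => simp
    | (j+2) =>
      rw [List.flatMap_cons, List.getElem?_append_right (by simp)]
      have h1 : (j+2) % 2 = j % 2 := by omega
      have h2 : (j+2) / 2 = j / 2 + 1 := by omega
      simp only [List.length_cons, List.length_nil]
      rw [show j + 2 - 2 = j from rfl] -- adjust if needed
      rw [ih j, h1, h2]
      simp

theorem pv_zip_get? (xs ys : List Int) (i : Nat) (h1 : i < xs.length) (h2 : i < ys.length) :
    (xs.zip ys)[i]? = some (xs[i], ys[i]) := by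
  rw [List.getElem?_eq_getElem (by simp; omega)]
  simp

theorem pv_flat_get (t : Int) (j : Nat) (hj : j < 2 * (t/2).toNat) :
    ((((List.range ((t+1)/2).toNat).map (fun i : Nat => (i : Int))).zip
        ((List.range (t/2).toNat).map (fun i : Nat => t - 1 - (i : Int)))).flatMap
      (fun p => [p.1, p.2]))[j]? = some (pvVal t j) := by
  rw [pv_flatPairs_get?]
  have h2 : j / 2 < (t/2).toNat := by omega
  have h1 : j / 2 < ((t+1)/2).toNat := by omega
  rw [pv_zip_get? _ _ _ (by simpa using h1) (by simpa using h2)]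
  by_cases hp : j % 2 = 0 <;>
    simp [hp, pvVal, List.getElem_map, List.getElem_range]

theorem pv_B_eq (n k : Int) :
    core_algorithm_alt n k = (List.range (n*k).toNat).map (fun j => pvF k (pvVal (n*k) j)) := by
  unfold core_algorithm_alt
  dsimp only
  rw [PySem.List.foldl_append_eq_flatMap, List.nil_append]
  have hcomp : (List.range (n*k).toNat).map (fun j => pvF k (pvVal (n*k) j))
      = ((List.range (n*k).toNat).map (pvVal (n*k))).map (pvF k) := by
    rw [List.map_map]; rfl
  rw [hcomp]
  have hfun : (fun v => [PySem.Int.floordiv v k + 1, PySem.Int.mod v k + 1]) = pvF k := rfl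
  rw [hfun]
  congr 1
  -- vals = (range m).map (pvVal t)
  have hL : PySem.Int.floordiv (n*k+1) 2 = (n*k+1)/2 :=
    PySem.Int.floordiv_eq_ediv_of_pos (by norm_num)
  have hH : PySem.Int.floordiv (n*k) 2 = (n*k)/2 :=
    PySem.Int.floordiv_eq_ediv_of_pos (by norm_num)
  rw [hL, hH]
  have hlows : PySem.List.pyRange 0 ((n*k+1)/2) 1
      = (List.range ((n*k+1)/2).toNat).map (fun i : Nat => (i : Int)) := by
    rw [PySem.List.pyRange_one, sub_zero]
    exact List.map_congr_left (fun i _ => by omega)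
  have hhighs : PySem.List.pyRange (n*k-1) (n*k-1 - (n*k)/2) (-1)
      = (List.range ((n*k)/2).toNat).map (fun i : Nat => n*k - 1 - (i : Int)) := by
    rw [PySem.List.pyRange_neg_one]
    have : (n*k - 1 - (n*k - 1 - (n*k)/2)).toNat = ((n*k)/2).toNat := by omega
    rw [this]
  rw [hlows, hhighs]
  have hab : ((n*k)/2).toNat ≤ ((n*k+1)/2).toNat ∧ ((n*k+1)/2).toNat ≤ ((n*k)/2).toNat + 1
      ∧ ((n*k+1)/2).toNat + ((n*k)/2).toNat = (n*k).toNat := by omega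
  apply List.ext_getElem?
  intro j
  rw [List.getElem?_map]
  have hflatlen : ((((List.range ((n*k+1)/2).toNat).map (fun i : Nat => (i : Int))).zip
      ((List.range ((n*k)/2).toNat).map (fun i : Nat => n*k - 1 - (i : Int)))).flatMap
      (fun p => [p.1, p.2])).length = 2 * ((n*k)/2).toNat := by
    rw [pv_flatPairs_length]
    simp
    omega
  split_ifs with htail
  · -- odd total: a = b + 1, trailing low element
    simp only [List.length_map, List.length_range] at htail
    by_cases hj : j < 2 * ((n*k)/2).toNat
    · rw [List.getElem?_append_left (by rw [hflatlen]; exact hj), pv_flat_get _ _ hj,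
          List.getElem?_range (by omega)]
      rfl
    · rw [List.getElem?_append_right (by rw [hflatlen]; omega), hflatlen]
      by_cases hj2 : j = 2 * ((n*k)/2).toNat
      · subst hj2
        rw [Nat.sub_self]
        have hne : ((List.range ((n*k+1)/2).toNat).map (fun i : Nat => (i : Int))) ≠ [] := by
          simp
          omega
        rw [List.getElem?_cons_zero, pv_getLast!_eq _ hne, List.getLast_eq_getElem,
            List.getElem?_range (by omega)]
        simp [List.getElem_map, List.getElem_range, pvVal]
        omega
      · rw [List.getElem?_eq_none (by simp; omega), List.getElem?_eq_none (by simp; omega)]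
        rfl
  · simp only [List.length_map, List.length_range] at htail
    by_cases hj : j < 2 * ((n*k)/2).toNat
    · rw [pv_flat_get _ _ hj, List.getElem?_range (by omega)]
      rfl
    · rw [List.getElem?_eq_none (by rw [hflatlen]; omega), List.getElem?_eq_none (by simp; omega)]
      rfl

-- ===== VERDICT (by name: the statement is the Claim_ definition above) =====
theorem core_algorithm_spec : Claim_equal_core_algorithm := by
  intro n k _
  unfold Spec_core_algorithm
  rw [pv_A_eq]
  exact (pv_B_eq n k).symm
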